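-- pv_equiv track=rewrite | github.com/the-omega-institute/automath | theory/2026_golden_ratio_driven_scan_projection_generation_recursive_emergence/scripts/exp_fold_collision_resonance_nullmodes_hankel.py | _verify_hankel_null
-- ===== SOURCE A (Python) =====
-- from typing import Dict, List, Tuple
--
-- def _verify_hankel_null(a: List[int], alpha: List[int], rows: int) -> bool:
--     # Verify sum_{i=0..rows-1} alpha[i] * a[i+t] == 0 for all valid shifts t.
--     n_max = len(a) - 1
--     t_max = n_max - (rows - 1)
--     for t in range(0, t_max + 1):
--         s = 0
--         for i in range(rows):
--             s += int(alpha[i]) * int(a[i + t])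
--         if s != 0:
--             return False
--     return True
-- ===== SOURCE B (Python) =====
-- def _verify_hankel_null(a, alpha, rows):
--     # Transposed traversal: maintain one partial sum per shift t across the
--     # alpha rows, then check all accumulated sums at the end.
--     t_max = len(a) - 1 - (rows - 1)
--     sums = [0] * (t_max + 1)
--     if not sums:
--         return True  # no shifts to check
--     for i in range(rows):
--         sums = [s + int(alpha[i]) * int(a[i + t]) for t, s in enumerate(sums)]
--     return all(s == 0 for s in sums)
-- ===== Notes on version B (the rewrite author's own statement) =====
-- stated objective: alternative
-- what changed: Replaces the shift-major loop with early return by a transposed row-major accumulation: a per-shift partial-sum table updated once per alpha row, with the zero check deferred to a single final pass.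
import Mathlib
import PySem

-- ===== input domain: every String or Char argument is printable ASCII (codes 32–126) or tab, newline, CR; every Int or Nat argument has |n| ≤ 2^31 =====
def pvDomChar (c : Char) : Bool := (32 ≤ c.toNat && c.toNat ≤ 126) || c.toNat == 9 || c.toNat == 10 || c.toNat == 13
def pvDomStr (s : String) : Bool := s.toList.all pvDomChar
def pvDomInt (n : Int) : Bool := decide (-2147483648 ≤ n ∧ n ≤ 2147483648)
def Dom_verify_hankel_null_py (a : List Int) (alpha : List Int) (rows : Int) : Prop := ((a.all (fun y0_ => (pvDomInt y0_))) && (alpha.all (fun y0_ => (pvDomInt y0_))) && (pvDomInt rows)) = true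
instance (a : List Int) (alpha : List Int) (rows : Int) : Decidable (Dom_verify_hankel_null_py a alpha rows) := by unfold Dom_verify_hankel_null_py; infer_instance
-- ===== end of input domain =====

-- B replaces A's shift-major loop (early return per shift) by a transposed row-major
-- accumulation into a per-shift partial-sum table, checked in one final pass (objective: alternative).

-- ===== PORT A =====
-- 'for t in ...: s = inner sum; if s != 0: return False' as structural recursion on the shift list
def pvALoop (a : List Int) (alpha : List Int) (rows : Int) : List Int → Bool
  | [] => true
  | t :: ts =>
    let s := (PySem.List.pyRange 0 rows 1).foldl
      (fun s i => s + PySem.List.pyGetD alpha i 0 * PySem.List.pyGetD a (i + t) 0) 0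
    if s ≠ 0 then false else pvALoop a alpha rows ts

def verify_hankel_null_py (a : List Int) (alpha : List Int) (rows : Int) : Bool :=
  let n_max : Int := (a.length : Int) - 1
  let t_max : Int := n_max - (rows - 1)
  pvALoop a alpha rows (PySem.List.pyRange 0 (t_max + 1) 1)

-- ===== PORT B =====
def verify_hankel_null_py_alt (a : List Int) (alpha : List Int) (rows : Int) : Bool :=
  let t_max : Int := (a.length : Int) - 1 - (rows - 1)
  let sums0 : List Int := List.replicate (t_max + 1).toNat 0
  if sums0.isEmpty then true else
  let sums := (PySem.List.pyRange 0 rows 1).foldl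
    (fun sums i =>
      (PySem.List.enumerate sums 0).map
        (fun p => p.2 + PySem.List.pyGetD alpha i 0 * PySem.List.pyGetD a (i + p.1) 0))
    sums0
  sums.all (fun s => s == 0)

-- ===== PRECONDITION & SPEC =====
-- Pre_ excludes exactly the inputs where the Python raises IndexError: some checked
-- shift exists (1 ≤ rows ≤ len a) while alpha is shorter than rows.
def Pre_verify_hankel_null_py (a : List Int) (alpha : List Int) (rows : Int) : Prop :=
  (1 ≤ rows ∧ rows ≤ (a.length : Int)) → rows ≤ (alpha.length : Int)
instance (a : List Int) (alpha : List Int) (rows : Int) : Decidable (Pre_verify_hankel_null_py a alpha rows) := by unfold Pre_verify_hankel_null_py; infer_instance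
def pvWitness_verify_hankel_null_py : List Int × List Int × Int := ([0, 0], [1], 1)

def Spec_verify_hankel_null_py (a : List Int) (alpha : List Int) (rows : Int) (out : Bool) : Prop := out = verify_hankel_null_py_alt a alpha rows
instance (a : List Int) (alpha : List Int) (rows : Int) (out : Bool) : Decidable (Spec_verify_hankel_null_py a alpha rows out) := by unfold Spec_verify_hankel_null_py; infer_instance

-- ===== CLAIM (what is proved, stated in full; the proofs are below) =====
def Claim_equal_verify_hankel_null_py : Prop := ∀ (a : List Int) (alpha : List Int) (rows : Int), Dom_verify_hankel_null_py a alpha rows → Pre_verify_hankel_null_py a alpha rows → Spec_verify_hankel_null_py a alpha rows (verify_hankel_null_py a alpha rows)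

-- ===== LEMMAS AND PROOFS =====

-- the inner dot product at shift t (the same expression both ports compute)
def pvS (a : List Int) (alpha : List Int) (rows : Int) (t : Int) : Int :=
  (PySem.List.pyRange 0 rows 1).foldl
    (fun s i => s + PySem.List.pyGetD alpha i 0 * PySem.List.pyGetD a (i + t) 0) 0

theorem pvALoop_eq_all (a alpha : List Int) (rows : Int) (ts : List Int) :
    pvALoop a alpha rows ts = ts.all (fun t => pvS a alpha rows t == 0) := by
  induction ts with
  | nil => rfl
  | cons t ts ih =>
    simp only [pvALoop, pvS, List.all_cons, ih]
    by_cases h : (PySem.List.pyRange 0 rows 1).foldl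
        (fun s i => s + PySem.List.pyGetD alpha i 0 * PySem.List.pyGetD a (i + t) 0) 0 = 0 <;>
      simp [h]

theorem pvEnum_map_pyRange (g : Int → Int) (c m : Int) :
    PySem.List.enumerate ((PySem.List.pyRange c m 1).map g) c
      = (PySem.List.pyRange c m 1).map (fun t => (t, g t)) := by
  by_cases h : c < m
  · have hn : (m - c).toNat ≠ 0 := by omega
    obtain ⟨k, hk⟩ := Nat.exists_eq_succ_of_ne_zero hn
    clear hn h
    induction k generalizing c with
    | zero =>
      have : m = c + 1 := by omega
      subst this
      simp [PySem.List.pyRange_one_singleton, PySem.List.enumerate_cons, PySem.List.enumerate_nil]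
    | succ k ih =>
      have hc : c < m := by omega
      rw [PySem.List.pyRange_one_cons hc]
      simp only [List.map_cons, PySem.List.enumerate_cons]
      rw [ih (c + 1) (by omega)]
  · rw [PySem.List.pyRange_one_eq_nil (by omega)]
    simp [PySem.List.enumerate_nil]

theorem pvFold_invariant (a alpha : List Int) (m : Int) (L : List Int) (g : Int → Int) :
    L.foldl
      (fun sums i =>
        (PySem.List.enumerate sums 0).map
          (fun p => p.2 + PySem.List.pyGetD alpha i 0 * PySem.List.pyGetD a (i + p.1) 0))
      ((PySem.List.pyRange 0 m 1).map g)
    = (PySem.List.pyRange 0 m 1).map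
        (fun t => g t + (L.map (fun i => PySem.List.pyGetD alpha i 0 * PySem.List.pyGetD a (i + t) 0)).sum) := by
  induction L generalizing g with
  | nil => simp
  | cons i L ih =>
    simp only [List.foldl_cons]
    rw [pvEnum_map_pyRange g 0 m, List.map_map]
    have hstep :
        ((fun p : Int × Int => p.2 + PySem.List.pyGetD alpha i 0 * PySem.List.pyGetD a (i + p.1) 0)
          ∘ fun t => (t, g t))
        = fun t => g t + PySem.List.pyGetD alpha i 0 * PySem.List.pyGetD a (i + t) 0 := by
      funext t; rfl
    rw [hstep, ih]
    apply List.map_congr_left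
    intro t _
    simp [List.sum_cons]
    ring

theorem pvReplicate_eq_map (m : Int) :
    List.replicate m.toNat (0 : Int) = (PySem.List.pyRange 0 m 1).map (fun _ => (0 : Int)) := by
  rw [PySem.List.pyRange_one, List.map_map]
  apply List.ext_getElem <;> simp

-- ===== VERDICT (by name: the statement is the Claim_ definition above) =====
theorem verify_hankel_null_py_spec : Claim_equal_verify_hankel_null_py := by
  intro a alpha rows _ _
  unfold Spec_verify_hankel_null_py verify_hankel_null_py verify_hankel_null_py_alt
  simp only
  rw [pvALoop_eq_all]
  by_cases hE : (List.replicate ((a.length : Int) - 1 - (rows - 1) + 1).toNat (0 : Int)).isEmpty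
  · simp only [hE, if_true]
    simp only [List.isEmpty_iff, List.replicate_eq_nil_iff] at hE
    rw [PySem.List.pyRange_one_eq_nil (by omega)]
    rfl
  simp only [hE]
  rw [pvReplicate_eq_map, pvFold_invariant, List.all_map]
  refine List.all_congr rfl ?_
  intro t
  simp only [Function.comp_apply, zero_add, pvS]
  rw [PySem.List.foldl_add]
  simp
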